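-- pv_equiv track=rewrite | github.com/Sirius2294/TypingPractice | pycrawlers/wikipedia.py | is_usable
-- ===== SOURCE A (Python) =====
-- def is_usable(letter : str):
--     usable_chars = [' ', '`', '1', '2', '3', '4', '5', '6', '7', '8', '9', '0', '-', '=', 'q', 'w', 'e', 'r', 't', 'y', 'u', 'i', 'o', 'p', '[', ']', '\\', 'a', 's', 'd', 'f', 'g', 'h', 'j', 'k', 'l', ';', "'", 'z', 'x', 'c', 'v', 'b', 'n', 'm', ',', '.', '/', '~', '!', '@', '#', '$', '%', '^', '&', '*', '(', ')', '_', '+', 'Q', 'W', 'E', 'R', 'T', 'Y', 'U', 'I', 'O', 'P', '{', '}', '|', 'A', 'S', 'D', 'F', 'G', 'H', 'J', 'K', 'L', ':', '"', 'Z', 'X', 'C', 'V', 'B', 'N', 'M', '<', '>', '?']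
--     for c in usable_chars:
--         if letter == c:
--             return True
--             break
--     else:
--         return False
-- ===== SOURCE B (Python) =====
-- def is_usable(letter : str):
--     # closed form: the allowed charset is exactly printable ASCII 32..126
--     return len(letter) == 1 and ' ' <= letter <= '~'
-- ===== Notes on version B (the rewrite author's own statement) =====
-- stated objective: simpler
-- what changed: Replaces the linear scan over a 95-element literal character list with a closed-form length-1 plus ' '..'~' range test (the list is exactly printable ASCII 32-126).
import Mathlib
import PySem

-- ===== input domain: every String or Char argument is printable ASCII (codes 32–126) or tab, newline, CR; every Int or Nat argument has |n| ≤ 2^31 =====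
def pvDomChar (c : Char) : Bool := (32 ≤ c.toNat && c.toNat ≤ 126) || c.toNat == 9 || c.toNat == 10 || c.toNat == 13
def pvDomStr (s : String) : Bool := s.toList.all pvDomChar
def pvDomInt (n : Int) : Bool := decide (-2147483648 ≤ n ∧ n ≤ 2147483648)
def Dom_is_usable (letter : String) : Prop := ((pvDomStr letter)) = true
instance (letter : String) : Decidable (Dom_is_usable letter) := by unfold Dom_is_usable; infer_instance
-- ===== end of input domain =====

-- B replaces A's linear scan over the 95-char literal list with a closed-form
-- length-1 + ' '..'~' range test (the list is exactly printable ASCII 32..126).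

-- ===== PORT A =====
-- A's literal usable_chars list (each Python element is a 1-char string)
def usableChars : List Char :=
  [' ', '`', '1', '2', '3', '4', '5', '6', '7', '8', '9', '0', '-', '=',
   'q', 'w', 'e', 'r', 't', 'y', 'u', 'i', 'o', 'p', '[', ']', '\\',
   'a', 's', 'd', 'f', 'g', 'h', 'j', 'k', 'l', ';', '\'',
   'z', 'x', 'c', 'v', 'b', 'n', 'm', ',', '.', '/',
   '~', '!', '@', '#', '$', '%', '^', '&', '*', '(', ')', '_', '+',
   'Q', 'W', 'E', 'R', 'T', 'Y', 'U', 'I', 'O', 'P', '{', '}', '|',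
   'A', 'S', 'D', 'F', 'G', 'H', 'J', 'K', 'L', ':', '"',
   'Z', 'X', 'C', 'V', 'B', 'N', 'M', '<', '>', '?']

-- the for-loop with early return True / else False
def isUsableLoop (letter : String) : List Char → Bool
  | [] => false
  | c :: cs => if letter = String.singleton c then true else isUsableLoop letter cs

def is_usable (letter : String) : Bool := isUsableLoop letter usableChars

-- ===== PORT B =====
-- len(letter) == 1 and ' ' <= letter <= '~'  (string comparison on a 1-char
-- string is exactly the comparison of its single character's code point)
def is_usable_alt (letter : String) : Bool :=
  match letter.toList with
  | [c] => decide (' ' ≤ c) && decide (c ≤ '~')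
  | _ => false

-- ===== PRECONDITION & SPEC =====
def Spec_is_usable (letter : String) (out : Bool) : Prop := out = is_usable_alt letter
instance (letter : String) (out : Bool) : Decidable (Spec_is_usable letter out) := by unfold Spec_is_usable; infer_instance

-- ===== CLAIM (what is proved, stated in full; the proofs are below) =====
def Claim_equal_is_usable : Prop := ∀ (letter : String), Dom_is_usable letter → Spec_is_usable letter (is_usable letter)

-- ===== LEMMAS AND PROOFS =====

theorem loop_eq_any (letter : String) (cs : List Char) :
    isUsableLoop letter cs = cs.any (fun c => letter.toList == [c]) := by
  induction cs with
  | nil => rfl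
  | cons c cs ih =>
    simp only [isUsableLoop, List.any_cons, ih]
    by_cases h : letter = String.singleton c
    · subst h; simp [String.singleton]
    · have h' : (letter.toList == [c]) = false := by
        rw [beq_eq_false_iff_ne]
        intro hc
        apply h
        have : letter.toList = (String.singleton c).toList := by simp [hc]
        exact String.toList_injective this
      simp [h, h']

theorem singleton_case : ∀ (n : Fin 95),
    (usableChars.any (fun c => [Char.ofNat (n.val + 32)] == [c])) =
      (decide (' ' ≤ Char.ofNat (n.val + 32)) && decide (Char.ofNat (n.val + 32) ≤ '~')) := by
  decide

-- ===== VERDICT (by name: the statement is the Claim_ definition above) =====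
theorem is_usable_spec : Claim_equal_is_usable := by
  intro letter hdom
  unfold Spec_is_usable
  rw [is_usable, loop_eq_any, is_usable_alt]
  match h : letter.toList with
  | [] => simp
  | [c] =>
    have hc : pvDomChar c = true := by
      have := hdom
      unfold Dom_is_usable pvDomStr at this
      rw [h] at this
      simpa using this
    have hcases : (32 ≤ c.toNat ∧ c.toNat ≤ 126) ∨ c.toNat = 9 ∨ c.toNat = 10 ∨ c.toNat = 13 := by
      simp only [pvDomChar, Bool.or_eq_true, Bool.and_eq_true, decide_eq_true_eq,
        beq_iff_eq] at hc
      omega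
    rcases hcases with ⟨h32, h126⟩ | h9 | h10 | h13
    · -- printable: use the finite check on codes 32..126
      have hn : c = Char.ofNat ((c.toNat - 32) + 32) := by
        have : (c.toNat - 32) + 32 = c.toNat := by omega
        rw [this, Char.ofNat_toNat]
      have hlt : c.toNat - 32 < 95 := by omega
      have := singleton_case ⟨c.toNat - 32, hlt⟩
      rw [hn]; simpa using this
    · -- tab
      have : c = Char.ofNat 9 := by rw [← h9, Char.ofNat_toNat]
      rw [this]; decide
    · have : c = Char.ofNat 10 := by rw [← h10, Char.ofNat_toNat]
      rw [this]; decide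
    · have : c = Char.ofNat 13 := by rw [← h13, Char.ofNat_toNat]
      rw [this]; decide
  | c :: c' :: cs =>
    simp
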